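-- pv_equiv track=rewrite | github.com/Tiresiasel/CiteWeave | src/processing/pdf/pdf_processor.py | _restore_citation_placeholders
-- ===== SOURCE A (Python) =====
-- def _restore_citation_placeholders(text: str) -> str:
--     """
--     恢复引用占位符为原始文本
--     """
--     replacements = [
--         ('ETAL_PLACEHOLDER', 'et al.'),
--         ('VS_PLACEHOLDER', 'vs.'),
--         ('PP_PLACEHOLDER', 'pp.'),
--         ('VOL_PLACEHOLDER', 'Vol.'),
--         ('NO_PLACEHOLDER', 'No.'),
--         ('FIG_PLACEHOLDER', 'Fig.'),
--         ('TAB_PLACEHOLDER', 'Tab.'),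
--         ('DR_PLACEHOLDER', 'Dr.'),
--         ('PROF_PLACEHOLDER', 'Prof.'),
--         ('MR_PLACEHOLDER', 'Mr.'),
--         ('MS_PLACEHOLDER', 'Ms.'),
--         ('MRS_PLACEHOLDER', 'Mrs.'),
--     ]
--
--     restored_text = text
--     for placeholder, original in replacements:
--         restored_text = restored_text.replace(placeholder, original)
--
--     return restored_text
-- ===== SOURCE B (Python) =====
-- import re
--
-- _REPLACEMENTS = {
--     'ETAL_PLACEHOLDER': 'et al.',
--     'VS_PLACEHOLDER': 'vs.',
--     'PP_PLACEHOLDER': 'pp.',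
--     'VOL_PLACEHOLDER': 'Vol.',
--     'NO_PLACEHOLDER': 'No.',
--     'FIG_PLACEHOLDER': 'Fig.',
--     'TAB_PLACEHOLDER': 'Tab.',
--     'DR_PLACEHOLDER': 'Dr.',
--     'PROF_PLACEHOLDER': 'Prof.',
--     'MR_PLACEHOLDER': 'Mr.',
--     'MS_PLACEHOLDER': 'Ms.',
--     'MRS_PLACEHOLDER': 'Mrs.',
-- }
--
-- _PATTERN = re.compile('|'.join(map(re.escape, _REPLACEMENTS)))
--
--
-- def _restore_citation_placeholders(text: str) -> str:
--     """Restore citation placeholders to their original abbreviations in one scan."""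
--     return _PATTERN.sub(lambda m: _REPLACEMENTS[m.group(0)], text)
-- ===== Notes on version B (the rewrite author's own statement) =====
-- stated objective: idiomatic
-- what changed: Replaces the 12 sequential str.replace passes with a precompiled regex alternation over a placeholder->abbreviation dict, restoring all placeholders in a single left-to-right scan with table-lookup dispatch.
import Mathlib
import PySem

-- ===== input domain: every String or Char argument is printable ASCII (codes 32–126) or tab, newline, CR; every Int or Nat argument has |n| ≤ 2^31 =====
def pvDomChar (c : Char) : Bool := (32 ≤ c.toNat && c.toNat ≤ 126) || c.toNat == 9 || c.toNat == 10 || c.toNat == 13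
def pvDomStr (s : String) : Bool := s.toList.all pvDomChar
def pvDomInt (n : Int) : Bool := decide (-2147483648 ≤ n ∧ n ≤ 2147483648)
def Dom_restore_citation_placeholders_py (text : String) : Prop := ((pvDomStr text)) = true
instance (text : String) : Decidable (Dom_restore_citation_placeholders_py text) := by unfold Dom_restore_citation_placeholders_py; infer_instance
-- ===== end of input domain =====

-- B replaces A's 12 sequential str.replace passes by one left-to-right scan that dispatches
-- placeholder -> abbreviation via a table (a precompiled regex alternation in Source B); same return value.

-- ===== PORT A =====
-- the 'replacements' list of A, verbatim
def pvReplacementsA : List (String × String) :=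
  [("ETAL_PLACEHOLDER", "et al."),
   ("VS_PLACEHOLDER", "vs."),
   ("PP_PLACEHOLDER", "pp."),
   ("VOL_PLACEHOLDER", "Vol."),
   ("NO_PLACEHOLDER", "No."),
   ("FIG_PLACEHOLDER", "Fig."),
   ("TAB_PLACEHOLDER", "Tab."),
   ("DR_PLACEHOLDER", "Dr."),
   ("PROF_PLACEHOLDER", "Prof."),
   ("MR_PLACEHOLDER", "Mr."),
   ("MS_PLACEHOLDER", "Ms."),
   ("MRS_PLACEHOLDER", "Mrs.")]

-- A: restored_text = text; for placeholder, original in replacements: restored_text = restored_text.replace(...)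
def restore_citation_placeholders_py (text : String) : String :=
  List.foldl (fun restored pr => PySem.Str.replace restored pr.1 pr.2) text pvReplacementsA

-- ===== PORT B =====
-- Source B's dict _REPLACEMENTS (placeholder -> original), as char lists
def pvTable : List (List Char × List Char) :=
  [("ETAL_PLACEHOLDER".toList, "et al.".toList),
   ("VS_PLACEHOLDER".toList, "vs.".toList),
   ("PP_PLACEHOLDER".toList, "pp.".toList),
   ("VOL_PLACEHOLDER".toList, "Vol.".toList),
   ("NO_PLACEHOLDER".toList, "No.".toList),
   ("FIG_PLACEHOLDER".toList, "Fig.".toList),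
   ("TAB_PLACEHOLDER".toList, "Tab.".toList),
   ("DR_PLACEHOLDER".toList, "Dr.".toList),
   ("PROF_PLACEHOLDER".toList, "Prof.".toList),
   ("MR_PLACEHOLDER".toList, "Mr.".toList),
   ("MS_PLACEHOLDER".toList, "Ms.".toList),
   ("MRS_PLACEHOLDER".toList, "Mrs.".toList)]

-- which alternative of the regex alternation matches at the current position (first in pattern order)
def pvFirstMatch : List (List Char × List Char) → List Char → Option (List Char × List Char)
  | [], _ => none
  | pr :: rest, s => if pr.1.isPrefixOf s then some pr else pvFirstMatch rest s

-- hand port of _PATTERN.sub(lambda m: _REPLACEMENTS[m.group(0)], text): re.sub over an alternation of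
-- escaped LITERAL keys scans left to right once, at each position taking the first alternative that
-- matches (emitting its dict value and skipping it) or else copying the character; exact for literals.
def pvScan (rs : List (List Char × List Char)) : List Char → List Char
  | [] => []
  | c :: t =>
    match pvFirstMatch rs (c :: t) with
    | some pr => pr.2 ++ pvScan rs (List.drop (pr.1.length - 1) t)
    | none => c :: pvScan rs t
termination_by s => s.length
decreasing_by all_goals (simp only [List.length_drop, List.length_cons]; omega)

def restore_citation_placeholders_py_alt (text : String) : String :=
  String.ofList (pvScan pvTable text.toList)

-- ===== PRECONDITION & SPEC =====
def Spec_restore_citation_placeholders_py (text : String) (out : String) : Prop := out = restore_citation_placeholders_py_alt text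
instance (text : String) (out : String) : Decidable (Spec_restore_citation_placeholders_py text out) := by unfold Spec_restore_citation_placeholders_py; infer_instance

-- ===== CLAIM (what is proved, stated in full; the proofs are below) =====
def Claim_equal_restore_citation_placeholders_py : Prop := ∀ (text : String), Dom_restore_citation_placeholders_py text → Spec_restore_citation_placeholders_py text (restore_citation_placeholders_py text)

-- ===== LEMMAS AND PROOFS =====

-- ==== go-level lemmas ====
lemma pvGo_nil (p o : List Char) (fuel : Nat) (acc : List Char) :
    PySem.Chars.replace.go p o fuel [] acc = acc.reverse := by
  cases fuel <;> simp [PySem.Chars.replace.go]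

lemma pvGo_succ (p o : List Char) (fuel : Nat) (c : Char) (t acc : List Char) :
    PySem.Chars.replace.go p o (fuel+1) (c::t) acc =
      if p.isPrefixOf (c::t) then PySem.Chars.replace.go p o fuel (List.drop p.length (c::t)) (o.reverse ++ acc)
      else PySem.Chars.replace.go p o fuel t (c::acc) := by
  simp [PySem.Chars.replace.go]

-- fuel-free single-pattern replace (the scan str.replace performs)
def pvRepc (p o : List Char) (s : List Char) : List Char :=
  PySem.Chars.replace.go p o s.length s []

lemma pvGo_eq_repc (p o : List Char) (hp : p ≠ []) :
    ∀ (fuel : Nat) (l acc : List Char), l.length ≤ fuel →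
      PySem.Chars.replace.go p o fuel l acc = acc.reverse ++ pvRepc p o l := by
  intro fuel
  induction fuel using Nat.strong_induction_on with
  | _ fuel ih =>
    intro l acc hl
    cases fuel with
    | zero =>
      have : l = [] := List.eq_nil_of_length_eq_zero (Nat.le_zero.mp hl)
      subst this
      simp [pvGo_nil, pvRepc]
    | succ n =>
      cases l with
      | nil => simp [pvGo_nil, pvRepc]
      | cons c t =>
        have hplen : 1 ≤ p.length := by
          cases p with
          | nil => exact absurd rfl hp
          | cons _ _ => simp
        have hl' : t.length ≤ n := by simp at hl; omega
        have hrlen : (List.drop p.length (c::t)).length ≤ n := by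
          simp [List.length_drop]; omega
        have hrlen' : (List.drop p.length (c::t)).length ≤ t.length := by
          simp [List.length_drop]; omega
        have hrepc : pvRepc p o (c::t) =
            if p.isPrefixOf (c::t) then o ++ pvRepc p o (List.drop p.length (c::t))
            else c :: pvRepc p o t := by
          unfold pvRepc
          rw [show (c::t).length = t.length + 1 from rfl, pvGo_succ]
          split
          · rw [ih t.length (by omega) _ _ hrlen']; unfold pvRepc; simp [List.length_drop]
          · rw [ih t.length (by omega) _ _ le_rfl]; simp [pvRepc]
        rw [pvGo_succ, hrepc]
        split
        · rw [ih n (by omega) _ _ hrlen]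
          simp
        · rw [ih n (by omega) _ _ hl']
          simp

lemma pvRepc_nil (p o : List Char) : pvRepc p o [] = [] := by simp [pvRepc, pvGo_nil]

lemma pvRepc_cons (p o : List Char) (hp : p ≠ []) (c : Char) (t : List Char) :
    pvRepc p o (c::t) =
      if p.isPrefixOf (c::t) then o ++ pvRepc p o (List.drop p.length (c::t))
      else c :: pvRepc p o t := by
  have hplen : 1 ≤ p.length := by
    cases p with
    | nil => exact absurd rfl hp
    | cons _ _ => simp
  have hrlen' : (List.drop p.length (c::t)).length ≤ t.length := by
    simp [List.length_drop]; omega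
  unfold pvRepc
  rw [show (c::t).length = t.length + 1 from rfl, pvGo_succ]
  split
  · rw [pvGo_eq_repc p o hp _ _ _ hrlen']; unfold pvRepc; simp [List.length_drop]
  · rw [pvGo_eq_repc p o hp _ _ _ le_rfl]; unfold pvRepc; simp

lemma pvReplace_eq_repc (p o s : List Char) (hp : p ≠ []) :
    PySem.Chars.replace s p o = pvRepc p o s := by
  unfold PySem.Chars.replace
  simp [List.isEmpty_iff, hp, pvRepc]

lemma pvFm_none_iff (rs : List (List Char × List Char)) (s : List Char) :
    pvFirstMatch rs s = none ↔ ∀ pr ∈ rs, ¬ pr.1 <+: s := by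
  induction rs with
  | nil => simp [pvFirstMatch]
  | cons pr rest ih =>
    simp only [pvFirstMatch]
    split
    · constructor
      · intro h; cases h
      · intro h
        exact absurd (List.isPrefixOf_iff_prefix.mp (by assumption)) (h pr (List.mem_cons_self ..))
    · rw [ih]
      constructor
      · intro h q hq
        rcases List.mem_cons.mp hq with rfl | hq'
        · rw [← List.isPrefixOf_iff_prefix]; simp_all
        · exact h q hq'
      · intro h q hq
        exact h q (List.mem_cons_of_mem _ hq)

lemma pvFm_some (rs : List (List Char × List Char)) (s : List Char) (pr : List Char × List Char)
    (h : pvFirstMatch rs s = some pr) : pr ∈ rs ∧ pr.1 <+: s := by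
  induction rs with
  | nil => simp [pvFirstMatch] at h
  | cons q rest ih =>
    simp only [pvFirstMatch] at h
    split at h
    · cases h
      exact ⟨List.mem_cons_self .., by rwa [← List.isPrefixOf_iff_prefix]⟩
    · obtain ⟨hm, hp⟩ := ih h
      exact ⟨List.mem_cons_of_mem _ hm, hp⟩

lemma pvScan_nil (rs : List (List Char × List Char)) : pvScan rs [] = [] := by
  simp [pvScan]

lemma pvScan_cons_none (rs : List (List Char × List Char)) (c : Char) (t : List Char)
    (h : pvFirstMatch rs (c::t) = none) : pvScan rs (c::t) = c :: pvScan rs t := by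
  rw [pvScan, h]

lemma pvScan_cons_some (rs : List (List Char × List Char)) (c : Char) (t : List Char)
    (pr : List Char × List Char) (h : pvFirstMatch rs (c::t) = some pr) (hne : pr.1 ≠ []) :
    pvScan rs (c::t) = pr.2 ++ pvScan rs (List.drop pr.1.length (c::t)) := by
  rw [pvScan, h]
  have h1 : 1 ≤ pr.1.length := by
    cases hp : pr.1 with
    | nil => exact absurd hp hne
    | cons _ _ => simp
  have h2 : pr.1.length - 1 + 1 = pr.1.length := by omega
  rw [show List.drop pr.1.length (c::t) = List.drop (pr.1.length - 1) t by
    rw [← h2, List.drop_succ_cons]; simp]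

lemma pvScan_rs_nil (s : List Char) : pvScan [] s = s := by
  induction s with
  | nil => simp [pvScan]
  | cons c t ih => rw [pvScan_cons_none [] c t (by simp [pvFirstMatch])]; rw [ih]

-- replacement text already emitted is inert: no pattern of rs matches starting inside o
lemma pvScan_prepend (rs : List (List Char × List Char)) :
    ∀ (o : List Char), (∀ pr ∈ rs, ∀ i < o.length, ¬ pr.1 <+: o.drop i ∧ ¬ o.drop i <+: pr.1) →
    ∀ u, pvScan rs (o ++ u) = o ++ pvScan rs u := by
  intro o
  induction o with
  | nil => intro _ u; simp
  | cons c o' ih =>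
    intro h u
    have hnone : pvFirstMatch rs ((c :: o') ++ u) = none := by
      rw [pvFm_none_iff]
      intro pr hpr hcon
      have h0 := h pr hpr 0 (by simp)
      simp only [List.drop_zero] at h0
      rcases List.prefix_or_prefix_of_prefix hcon (List.prefix_append (c :: o') u) with h1 | h1
      · exact h0.1 h1
      · exact h0.2 h1
    rw [List.cons_append, pvScan_cons_none rs c (o' ++ u) (by rwa [← List.cons_append]), ih
      (fun pr hpr i hi => by
        have := h pr hpr (i+1) (by simpa using Nat.succ_lt_succ hi)
        simpa using this) u]
    simp

-- single-pattern replacement creates no new occurrence of q at the front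
lemma pvNoNew (p o : List Char) (hp : p ≠ []) :
    ∀ (s q : List Char), (∀ j < q.length, ¬ q.drop j <+: o ∧ ¬ o <+: q.drop j) →
      q <+: pvRepc p o s → q <+: s := by
  intro s
  induction s with
  | nil =>
    intro q _ hq
    rw [pvRepc_nil] at hq
    simpa [List.prefix_nil] using hq
  | cons c t ih =>
    intro q hcond hq
    rw [pvRepc_cons p o hp c t] at hq
    split at hq
    · cases q with
      | nil => exact List.nil_prefix
      | cons d q' =>
        exfalso
        have h0 := hcond 0 (by simp)
        simp only [List.drop_zero] at h0
        rcases List.prefix_or_prefix_of_prefix hq (List.prefix_append o _) with h1 | h1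
        · exact h0.1 h1
        · exact h0.2 h1
    · cases q with
      | nil => exact List.nil_prefix
      | cons d q' =>
        rw [List.cons_prefix_cons] at hq
        obtain ⟨rfl, hq'⟩ := hq
        have : q' <+: t := ih q' (fun j hj => by
          have := hcond (j+1) (by simpa using Nat.succ_lt_succ hj)
          simpa using this) hq'
        exact List.cons_prefix_cons.mpr ⟨rfl, this⟩

-- replacement passes over a region with no pattern occurrence unchanged
lemma pvSkip (p o : List Char) (hp : p ≠ []) :
    ∀ (n : Nat) (s : List Char), n ≤ s.length → (∀ j < n, ¬ p <+: s.drop j) →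
      pvRepc p o s = s.take n ++ pvRepc p o (s.drop n) := by
  intro n
  induction n with
  | zero => intro s _ _; simp
  | succ n ih =>
    intro s hlen hno
    cases s with
    | nil => simp at hlen
    | cons c t =>
      have h0 : ¬ p <+: (c :: t) := by simpa using hno 0 (by omega)
      rw [pvRepc_cons p o hp c t, if_neg (by simpa [List.isPrefixOf_iff_prefix] using h0)]
      rw [ih t (by simpa using hlen) (fun j hj => by
        have := hno (j+1) (by omega)
        simpa using this)]
      simp

def pvHY (rs : List (List Char × List Char)) : Prop :=
  (∀ pr ∈ rs, pr.1 ≠ []) ∧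
  ∀ pr ∈ rs, ∀ qr ∈ rs,
    (∀ i < pr.2.length, ¬ qr.1 <+: List.drop i pr.2 ∧ ¬ List.drop i pr.2 <+: qr.1) ∧
    (∀ j < qr.1.length, ¬ List.drop j qr.1 <+: pr.2 ∧ ¬ pr.2 <+: List.drop j qr.1) ∧
    (∀ j < qr.1.length, 1 ≤ j → ¬ pr.1 <+: List.drop j qr.1 ∧ ¬ List.drop j qr.1 <+: pr.1) ∧
    (pr.1 ≠ qr.1 → ¬ pr.1 <+: qr.1)

set_option maxHeartbeats 2000000 in
lemma pvHY_table : pvHY pvTable := by unfold pvHY; decide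

lemma pvFm_stable (rs : List (List Char × List Char)) (s : List Char) (qr : List Char × List Char)
    (w : List Char) (h : pvFirstMatch rs s = some qr) (hq : qr.1 <+: s)
    (hnp : ∀ pr ∈ rs, pr.1 ≠ qr.1 → ¬ qr.1 <+: pr.1) :
    pvFirstMatch rs (qr.1 ++ w) = some qr := by
  induction rs with
  | nil => simp [pvFirstMatch] at h
  | cons pr rest ih =>
    simp only [pvFirstMatch] at h ⊢
    split at h
    · cases h
      rw [if_pos (by rw [List.isPrefixOf_iff_prefix]; exact List.prefix_append _ _)]
    · rename_i hfail
      rw [List.isPrefixOf_iff_prefix] at hfail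
      have hpr : ¬ pr.1 <+: qr.1 ++ w := by
        intro hcon
        rcases List.prefix_or_prefix_of_prefix hcon (List.prefix_append qr.1 w) with h1 | h1
        · exact hfail (h1.trans hq)
        · by_cases he : pr.1 = qr.1
          · exact hfail (he ▸ hq)
          · exact hnp pr (List.mem_cons_self ..) he h1
      rw [if_neg (by simpa [List.isPrefixOf_iff_prefix] using hpr)]
      exact ih h (fun a ha => hnp a (List.mem_cons_of_mem _ ha))

lemma pvHY_tail (pr : List Char × List Char) (rs : List (List Char × List Char))
    (h : pvHY (pr :: rs)) : pvHY rs :=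
  ⟨fun q hq => h.1 q (List.mem_cons_of_mem _ hq),
   fun a ha b hb => h.2 a (List.mem_cons_of_mem _ ha) b (List.mem_cons_of_mem _ hb)⟩

lemma pvKey (p o : List Char) (rs : List (List Char × List Char))
    (hy : pvHY ((p,o) :: rs)) :
    ∀ (n : Nat) (s : List Char), s.length ≤ n →
      pvScan rs (pvRepc p o s) = pvScan ((p,o) :: rs) s := by
  have hp : p ≠ [] := hy.1 (p,o) (List.mem_cons_self ..)
  have hplen : 1 ≤ p.length := by
    cases hc : p with
    | nil => exact absurd hc hp
    | cons _ _ => simp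
  intro n
  induction n with
  | zero =>
    intro s hl
    have : s = [] := List.eq_nil_of_length_eq_zero (Nat.le_zero.mp hl)
    subst this
    rw [pvRepc_nil, pvScan_nil, pvScan_nil]
  | succ n ih =>
    intro s hl
    cases s with
    | nil => rw [pvRepc_nil, pvScan_nil, pvScan_nil]
    | cons c t =>
      simp only [List.length_cons] at hl
      by_cases hps : p <+: (c :: t)
      · -- p matches at the head: both sides emit o and continue after it
        rw [pvRepc_cons p o hp c t, if_pos (List.isPrefixOf_iff_prefix.mpr hps)]
        have hinert : ∀ pr ∈ rs, ∀ i < o.length, ¬ pr.1 <+: List.drop i o ∧ ¬ List.drop i o <+: pr.1 := by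
          intro pr hpr i hi
          exact (hy.2 (p,o) (List.mem_cons_self ..) pr (List.mem_cons_of_mem _ hpr)).1 i hi
        rw [pvScan_prepend rs o hinert]
        have hdl : (List.drop p.length (c :: t)).length ≤ n := by
          simp only [List.length_drop, List.length_cons]; omega
        rw [ih _ hdl]
        have hfm : pvFirstMatch ((p,o) :: rs) (c :: t) = some (p, o) := by
          simp only [pvFirstMatch]
          rw [if_pos (List.isPrefixOf_iff_prefix.mpr hps)]
        rw [pvScan_cons_some _ c t (p,o) hfm hp]
      · -- p does not match at the head
        rw [pvRepc_cons p o hp c t, if_neg (by simpa [List.isPrefixOf_iff_prefix] using hps)]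
        have hfm1 : pvFirstMatch ((p,o) :: rs) (c :: t) = pvFirstMatch rs (c :: t) := by
          simp only [pvFirstMatch]
          rw [if_neg (by simpa [List.isPrefixOf_iff_prefix] using hps)]
        cases hfm : pvFirstMatch rs (c :: t) with
        | none =>
          have hscanB : pvScan ((p,o) :: rs) (c :: t) = c :: pvScan ((p,o) :: rs) t :=
            pvScan_cons_none _ c t (hfm1.trans hfm)
          have hnone : pvFirstMatch rs (c :: pvRepc p o t) = none := by
            rw [pvFm_none_iff]
            intro pr hpr hcon
            have hprne : pr.1 ≠ [] := hy.1 pr (List.mem_cons_of_mem _ hpr)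
            cases hc : pr.1 with
            | nil => exact hprne hc
            | cons d q' =>
              rw [hc, List.cons_prefix_cons] at hcon
              obtain ⟨rfl, hq'⟩ := hcon
              have hcond : ∀ j < q'.length, ¬ List.drop j q' <+: o ∧ ¬ o <+: List.drop j q' := by
                intro j hj
                have := (hy.2 (p,o) (List.mem_cons_self ..) pr (List.mem_cons_of_mem _ hpr)).2.1
                  (j+1) (by rw [hc]; simpa using Nat.succ_lt_succ hj)
                rwa [hc, List.drop_succ_cons] at this
              have := pvNoNew p o hp t q' hcond hq'
              exact (pvFm_none_iff _ _).mp hfm pr hpr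
                (by rw [hc]; exact List.cons_prefix_cons.mpr ⟨rfl, this⟩)
          rw [pvScan_cons_none rs c _ hnone, ih t (by omega), hscanB]
        | some qr =>
          obtain ⟨hqmem, hqpre⟩ := pvFm_some rs (c :: t) qr hfm
          have hqne : qr.1 ≠ [] := hy.1 qr (List.mem_cons_of_mem _ hqmem)
          cases hqc : qr.1 with
          | nil => exact absurd hqc hqne
          | cons d q' =>
            rw [hqc, List.cons_prefix_cons] at hqpre
            obtain ⟨rfl, hq't⟩ := hqpre
            -- p has no occurrence inside the matched region
            have hno : ∀ j < q'.length, ¬ p <+: List.drop j t := by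
              intro j hj hcon
              have hdropq : List.drop (j+1) qr.1 <+: List.drop j t := by
                rw [hqc, List.drop_succ_cons]
                exact List.IsPrefix.drop hq't j
              have hov := (hy.2 (p,o) (List.mem_cons_self ..) qr (List.mem_cons_of_mem _ hqmem)).2.2.1
                (j+1) (by rw [hqc]; simpa using Nat.succ_lt_succ hj) (by omega)
              rcases List.prefix_or_prefix_of_prefix hcon hdropq with h1 | h1
              · exact hov.1 h1
              · exact hov.2 h1
            have hlen' : q'.length ≤ t.length := hq't.length_le
            have hskip : pvRepc p o t = q' ++ pvRepc p o (List.drop q'.length t) := by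
              rw [pvSkip p o hp q'.length t hlen' hno]
              congr 1
              exact (List.prefix_iff_eq_take.mp hq't).symm
            have hstab : pvFirstMatch rs (qr.1 ++ pvRepc p o (List.drop q'.length t)) = some qr :=
              pvFm_stable _ _ qr _ hfm (by rw [hqc]; exact List.cons_prefix_cons.mpr ⟨rfl, hq't⟩)
                (fun pr hpr hne => ((hy.2 qr (List.mem_cons_of_mem _ hqmem) pr
                  (List.mem_cons_of_mem _ hpr)).2.2.2) (fun he => hne he.symm))
            have hX : List.drop qr.1.length (d :: (q' ++ pvRepc p o (List.drop q'.length t)))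
                = pvRepc p o (List.drop q'.length t) := by
              rw [hqc, List.length_cons, List.drop_succ_cons, List.drop_left]
            have hstep : pvScan rs (d :: pvRepc p o t) =
                qr.2 ++ pvScan rs (pvRepc p o (List.drop q'.length t)) := by
              rw [hskip]
              rw [pvScan_cons_some rs d (q' ++ pvRepc p o (List.drop q'.length t)) qr
                (by rw [← List.cons_append, ← hqc]; exact hstab) hqne]
              rw [hX]
            rw [hstep, ih _ (by simp [List.length_drop]; omega)]
            have hfmB := hfm1.trans hfm
            rw [pvScan_cons_some _ d t qr hfmB hqne]
            rw [show List.drop qr.1.length (d :: t) = List.drop q'.length t by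
              rw [hqc, List.length_cons, List.drop_succ_cons]]

lemma pvFold (rs : List (List Char × List Char)) (hy : pvHY rs) :
    ∀ s : List Char,
      List.foldl (fun acc pr => PySem.Chars.replace acc pr.1 pr.2) s rs = pvScan rs s := by
  induction rs with
  | nil => intro s; rw [List.foldl_nil, pvScan_rs_nil]
  | cons pr rest ih =>
    intro s
    have hp : pr.1 ≠ [] := hy.1 pr (List.mem_cons_self ..)
    rw [List.foldl_cons, ih (pvHY_tail pr rest hy), pvReplace_eq_repc pr.1 pr.2 s hp]
    obtain ⟨p, o⟩ := pr
    exact pvKey p o rest hy s.length s le_rfl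

lemma pvFoldStr (prs : List (String × String)) :
    ∀ s : String,
      (List.foldl (fun acc pr => PySem.Str.replace acc pr.1 pr.2) s prs).toList =
        List.foldl (fun acc pr => PySem.Chars.replace acc pr.1.toList pr.2.toList) s.toList prs := by
  induction prs with
  | nil => intro s; simp
  | cons pr rest ih =>
    intro s
    rw [List.foldl_cons, List.foldl_cons, ih, PySem.Str.toList_replace]

lemma pvTable_eq : pvReplacementsA.map (fun pr => (pr.1.toList, pr.2.toList)) = pvTable := by decide

lemma pvMain : ∀ s : String,
    List.foldl (fun acc pr => PySem.Str.replace acc pr.1 pr.2) s pvReplacementsA =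
      String.ofList (pvScan pvTable s.toList) := by
  intro s
  have h1 := pvFoldStr pvReplacementsA s
  rw [show List.foldl (fun acc pr => PySem.Chars.replace acc pr.1.toList pr.2.toList) s.toList pvReplacementsA
      = List.foldl (fun acc pr => PySem.Chars.replace acc pr.1 pr.2) s.toList
          (pvReplacementsA.map (fun pr => (pr.1.toList, pr.2.toList))) by
    rw [List.foldl_map]] at h1
  rw [pvTable_eq, pvFold pvTable pvHY_table s.toList] at h1
  rw [← h1, String.ofList_toList]

-- ===== VERDICT (by name: the statement is the Claim_ definition above) =====
theorem restore_citation_placeholders_py_spec : Claim_equal_restore_citation_placeholders_py := by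
  intro text _
  unfold Spec_restore_citation_placeholders_py restore_citation_placeholders_py restore_citation_placeholders_py_alt
  exact pvMain text
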